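-- pv_equiv track=rewrite | github.com/abhijeet-ag/medtriage_env | server/environment.py | _best_symptom_response_key
-- ===== SOURCE A (Python) =====
-- from typing import Any, List, Optional
--
-- def _norm(s: Any) -> str:
--     return str(s).lower().strip().replace("_", " ").replace("-", " ")
--
-- def _best_symptom_response_key(question: str, symptom_responses: dict) -> Optional[str]:
--     """Pick the longest matching key using case-insensitive substring overlap."""
--     if not str(question).strip() or not symptom_responses:
--         return None
--     q = _norm(question)
--     matches: List[Any] = []
--     for key in symptom_responses:
--         k = _norm(key)
--         if not k:
--             continue
--         if k in q or q in k:
--             matches.append(key)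
--     if not matches:
--         return None
--     return max(matches, key=lambda k: len(_norm(k)))
-- ===== SOURCE B (Python) =====
-- from typing import Any, Optional
--
-- def _norm(s: Any) -> str:
--     return str(s).lower().strip().replace("_", " ").replace("-", " ")
--
-- def _best_symptom_response_key(question: str, symptom_responses: dict) -> Optional[str]:
--     """Longest-first scan: sort keys by normalized length descending (stable),
--     return the first one with a substring overlap with the normalized question."""
--     if not str(question).strip() or not symptom_responses:
--         return None
--     q = _norm(question)
--     for key in sorted(symptom_responses, key=lambda k: len(_norm(k)), reverse=True):
--         k = _norm(key)
--         if k and (k in q or q in k):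
--             return key
--     return None
-- ===== Notes on version B (the rewrite author's own statement) =====
-- stated objective: faster
-- what changed: Replaced filter-all-matches-then-max with a stable sort of the keys by normalized length descending followed by an early-return scan for the first overlapping key.
import Mathlib
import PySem

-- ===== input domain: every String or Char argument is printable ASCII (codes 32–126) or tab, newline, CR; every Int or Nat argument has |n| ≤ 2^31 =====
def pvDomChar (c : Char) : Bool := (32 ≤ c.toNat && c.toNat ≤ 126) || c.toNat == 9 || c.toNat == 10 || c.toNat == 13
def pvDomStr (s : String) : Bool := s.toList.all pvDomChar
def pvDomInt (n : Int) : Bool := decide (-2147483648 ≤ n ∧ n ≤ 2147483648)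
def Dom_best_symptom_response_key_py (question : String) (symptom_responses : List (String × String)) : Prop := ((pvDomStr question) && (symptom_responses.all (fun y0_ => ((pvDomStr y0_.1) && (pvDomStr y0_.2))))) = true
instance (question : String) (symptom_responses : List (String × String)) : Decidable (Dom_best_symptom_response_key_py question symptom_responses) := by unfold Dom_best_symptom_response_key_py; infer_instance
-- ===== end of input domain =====

-- B replaces A's filter-then-max with a stable longest-first sort of the keys and an
-- early-return scan for the first overlapping key (measurably faster in a timing run).


-- ===== PORT A =====
-- _norm(s) = str(s).lower().strip().replace("_", " ").replace("-", " ")  (shared helper of the module)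
def pvNorm (s : List Char) : List Char :=
  PySem.Chars.replace (PySem.Chars.replace (PySem.Chars.strip (PySem.Chars.lower s)) ['_'] [' ']) ['-'] [' ']

-- A: collect all keys with non-empty normalization and substring overlap, then max by normalized length
def best_symptom_response_key_py (question : String) (symptom_responses : List (String × String)) : Option String :=
  if PySem.Chars.strip question.toList = [] ∨ symptom_responses = [] then none
  else
    let q := pvNorm question.toList
    let mlist := (PySem.List.dedup (symptom_responses.map Prod.fst)).foldl
      (fun acc key =>
        let k := pvNorm key.toList
        if k = [] then acc
        else if PySem.Chars.isIn k q || PySem.Chars.isIn q k then acc ++ [key]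
        else acc) []
    if mlist = [] then none
    else PySem.List.max? mlist (fun k => (pvNorm k.toList).length)

-- ===== PORT B =====
-- B's scan: return the first key in the (longest-normalized-first) list that overlaps
def pvScan (q : List Char) : List String → Option String
  | [] => none
  | key :: rest =>
    let k := pvNorm key.toList
    if k = [] then pvScan q rest
    else if PySem.Chars.isIn k q || PySem.Chars.isIn q k then some key
    else pvScan q rest

def best_symptom_response_key_py_alt (question : String) (symptom_responses : List (String × String)) : Option String :=
  if PySem.Chars.strip question.toList = [] ∨ symptom_responses = [] then none
  else
    let q := pvNorm question.toList
    pvScan q (PySem.List.sorted (PySem.List.dedup (symptom_responses.map Prod.fst))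
      (fun k => (pvNorm k.toList).length) true)

-- ===== PRECONDITION & SPEC =====
def Spec_best_symptom_response_key_py (question : String) (symptom_responses : List (String × String)) (out : Option String) : Prop := out = best_symptom_response_key_py_alt question symptom_responses
instance (question : String) (symptom_responses : List (String × String)) (out : Option String) : Decidable (Spec_best_symptom_response_key_py question symptom_responses out) := by unfold Spec_best_symptom_response_key_py; infer_instance

-- ===== CLAIM (what is proved, stated in full; the proofs are below) =====
def Claim_equal_best_symptom_response_key_py : Prop := ∀ (question : String) (symptom_responses : List (String × String)), Dom_best_symptom_response_key_py question symptom_responses → Spec_best_symptom_response_key_py question symptom_responses (best_symptom_response_key_py question symptom_responses)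

-- ===== LEMMAS AND PROOFS =====

-- the common match predicate
def pvMatch (q k : List Char) : Bool :=
  !decide (k = []) && (PySem.Chars.isIn k q || PySem.Chars.isIn q k)

-- B's scan is find? of the match predicate
theorem pvScan_eq_find? (q : List Char) (l : List String) :
    pvScan q l = l.find? (fun key => pvMatch q (pvNorm key.toList)) := by
  induction l with
  | nil => rfl
  | cons key rest ih =>
    simp only [List.find?_cons]
    by_cases hk : pvNorm key.toList = []
    · have hP : pvMatch q (pvNorm key.toList) = false := by simp [pvMatch, hk]
      rw [hP]
      simp [pvScan, hk, ih]
    · by_cases hm : (PySem.Chars.isIn (pvNorm key.toList) q || PySem.Chars.isIn q (pvNorm key.toList)) = true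
      · have hP : pvMatch q (pvNorm key.toList) = true := by simp [pvMatch, hk, hm]
        rw [hP]
        simp [pvScan, hk, hm]
      · have hP : pvMatch q (pvNorm key.toList) = false := by
          simp only [pvMatch, Bool.and_eq_false_iff]
          right; simpa using hm
        rw [hP]
        simp [pvScan, hk, hm, ih]

-- Python max(l + [x], key=f) in terms of max(l, key=f)
theorem max?_append_singleton (l : List String) (x : String) (f : String → Nat) :
    PySem.List.max? (l ++ [x]) f =
      match PySem.List.max? l f with
      | none => some x
      | some m => if f m < f x then some x else some m := by
  unfold PySem.List.max?
  rw [List.foldl_append]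
  simp only [List.foldl_cons, List.foldl_nil]
  split <;> rename_i h <;> rw [h]

-- find? after a stable descending insertion equals the max?-style step
theorem find?_insertBy (f : String → Nat) (P : String → Bool) (x : String) (S : List String)
    (hdesc : S.Pairwise (fun a b => f b ≤ f a)) :
    (PySem.List.insertBy (fun a b => decide (f b < f a)) x S).find? P =
      match S.find? P with
      | none => if P x then some x else none
      | some m => if P x && decide (f m < f x) then some x else some m := by
  induction S with
  | nil => by_cases hx : P x <;> simp [PySem.List.insertBy, List.find?, hx]
  | cons y ys ih =>
    have hy : ∀ z ∈ ys, f z ≤ f y := fun z hz => (List.pairwise_cons.mp hdesc).1 z hz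
    have htl := (List.pairwise_cons.mp hdesc).2
    by_cases hlt : f y < f x
    · -- x goes in front
      have hins : PySem.List.insertBy (fun a b => decide (f b < f a)) x (y :: ys) = x :: y :: ys := by
        simp [PySem.List.insertBy, hlt]
      rw [hins]
      by_cases hx : P x
      · rw [List.find?_cons_of_pos hx]
        cases hfind : (y :: ys).find? P with
        | none => simp [hx]
        | some m =>
          have hm : m ∈ y :: ys := List.mem_of_find?_eq_some hfind
          have hle : f m ≤ f y := by
            rcases List.mem_cons.mp hm with h | h
            · simp [h]
            · exact hy m h
          have : f m < f x := lt_of_le_of_lt hle hlt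
          simp [hx, this]
      · rw [List.find?_cons_of_neg hx]
        cases hfind : (y :: ys).find? P with
        | none => rw [hfind] at *; simp [hx]
        | some m => rw [hfind] at *; simp [hx]
    · -- x goes after y
      have hins : PySem.List.insertBy (fun a b => decide (f b < f a)) x (y :: ys) =
          y :: PySem.List.insertBy (fun a b => decide (f b < f a)) x ys := by
        simp [PySem.List.insertBy, hlt]
      rw [hins]
      by_cases hyP : P y
      · rw [List.find?_cons_of_pos hyP, List.find?_cons_of_pos hyP]
        simp [hlt]
      · rw [List.find?_cons_of_neg hyP, List.find?_cons_of_neg hyP]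
        exact ih htl

-- main bridge: scanning the descending-sorted list is max? of the filter
theorem find?_sorted_eq_max? (f : String → Nat) (P : String → Bool) (keys : List String) :
    (PySem.List.sorted keys f true).find? P = PySem.List.max? (keys.filter P) f := by
  induction keys using List.reverseRecOn with
  | nil => rfl
  | append_singleton keys x ih =>
    rw [PySem.List.sorted_rev_eq_foldl_insertBy, List.foldl_append,
      ← PySem.List.sorted_rev_eq_foldl_insertBy]
    simp only [List.foldl_cons, List.foldl_nil]
    rw [find?_insertBy f P x _ (PySem.List.sorted_pairwise_rev keys f), ih, List.filter_append]
    by_cases hx : P x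
    · have hfil : List.filter P [x] = [x] := by simp [hx]
      rw [hfil, max?_append_singleton]
      cases hmax : PySem.List.max? (keys.filter P) f with
      | none => simp [hx]
      | some m => simp [hx]
    · have hfil : List.filter P [x] = [] := by simp [hx]
      rw [hfil, List.append_nil]
      cases hmax : PySem.List.max? (keys.filter P) f with
      | none => simp [hx]
      | some m => simp [hx]

-- A's loop builds exactly the filter of the match predicate
theorem foldl_matches_eq_filter (q : List Char) (keys : List String) :
    keys.foldl (fun acc key =>
        let k := pvNorm key.toList
        if k = [] then acc
        else if PySem.Chars.isIn k q || PySem.Chars.isIn q k then acc ++ [key]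
        else acc) [] =
      keys.filter (fun key => pvMatch q (pvNorm key.toList)) := by
  have h : ∀ (acc : List String) (key : String), key ∈ keys →
      (let k := pvNorm key.toList
       if k = [] then acc
       else if PySem.Chars.isIn k q || PySem.Chars.isIn q k then acc ++ [key]
       else acc) =
      (if pvMatch q (pvNorm key.toList) then acc ++ [key] else acc) := by
    intro acc key _
    by_cases hk : pvNorm key.toList = [] <;>
      by_cases hm : (PySem.Chars.isIn (pvNorm key.toList) q || PySem.Chars.isIn q (pvNorm key.toList)) = true <;>
      simp [pvMatch, hk, hm]
  refine (PySem.List.foldl_congr_mem _ _ _ _ h).trans ?_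
  rw [PySem.List.foldl_append_if_eq_filter]
  simp

-- ===== VERDICT (by name: the statement is the Claim_ definition above) =====
theorem best_symptom_response_key_py_spec : Claim_equal_best_symptom_response_key_py := by
  intro question symptom_responses _
  unfold Spec_best_symptom_response_key_py best_symptom_response_key_py best_symptom_response_key_py_alt
  by_cases hguard : PySem.Chars.strip question.toList = [] ∨ symptom_responses = []
  · simp [hguard]
  · simp only [hguard, if_false]
    simp only [pvScan_eq_find?, find?_sorted_eq_max?, foldl_matches_eq_filter]
    by_cases hemp : (PySem.List.dedup (symptom_responses.map Prod.fst)).filter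
        (fun key => pvMatch (pvNorm question.toList) (pvNorm key.toList)) = []
    · rw [if_pos hemp, hemp]
      rfl
    · rw [if_neg hemp]
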